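-- pv_equiv track=rewrite | github.com/RandomPower/IID_validation | tests/runs/n_of_directional_runs.py | n_directional_runs
-- ===== SOURCE A (Python) =====
-- def n_directional_runs(S):
--     """Measures the number of runs constructed using the relations between consecutive samples
--
--     Parameters
--     ----------
--     S : list of int
--         sequence of sample values
--
--     Returns
--     -------
--     int
--         number of runs
--     """
--     S_prime = []
--     for i in range(len(S) - 1):
--         if S[i] > S[i + 1]:
--             S_prime.append(-1)
--         else:
--             S_prime.append(1)
--     if len(S_prime) == 0:
--         return 0
--     # S_prime should be len(S) - 1
--
--     T = 1
--     for k in range(1, len(S_prime)):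
--         if S_prime[k] != S_prime[k - 1]:
--             T += 1
--     return T
-- ===== SOURCE B (Python) =====
-- def n_directional_runs(S):
--     """Measures the number of runs constructed using the relations between consecutive samples
--
--     Counts maximal same-direction segments directly: the outer loop counts one run
--     per iteration, the inner loop advances to the end of that run.
--     """
--     n = len(S)
--     runs = 0
--     i = 0
--     while i < n - 1:
--         up = not (S[i] > S[i + 1])
--         i += 1
--         while i < n - 1 and (not (S[i] > S[i + 1])) == up:
--             i += 1
--         runs += 1
--     return runs
-- ===== Notes on version B (the rewrite author's own statement) =====
-- stated objective: alternative
-- what changed: B counts maximal same-direction segments directly with a nested scan (outer loop per run, inner loop advancing to the run's end), instead of A's two staged passes that materialise the sign list and then count its transitions plus one.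
import Mathlib
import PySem

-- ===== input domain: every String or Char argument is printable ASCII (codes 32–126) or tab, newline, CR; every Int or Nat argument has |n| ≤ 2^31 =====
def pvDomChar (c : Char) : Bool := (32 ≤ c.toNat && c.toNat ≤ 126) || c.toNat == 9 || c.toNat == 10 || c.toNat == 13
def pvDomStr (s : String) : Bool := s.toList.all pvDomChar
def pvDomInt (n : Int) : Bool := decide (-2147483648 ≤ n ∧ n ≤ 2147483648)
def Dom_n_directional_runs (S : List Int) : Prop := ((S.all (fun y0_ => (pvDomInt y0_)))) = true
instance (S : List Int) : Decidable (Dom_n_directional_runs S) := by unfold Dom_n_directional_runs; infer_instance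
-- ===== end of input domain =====

-- B counts maximal same-direction segments directly (outer loop per run, inner loop to the run's end) instead of A's staged sign-list build + transition count.

-- ===== PORT A =====
def n_directional_runs (S : List Int) : Int :=
  let S_prime : List Int :=
    (PySem.List.pyRange 0 ((S.length : Int) - 1) 1).foldl
      (fun acc i =>
        if PySem.List.pyGetD S i 0 > PySem.List.pyGetD S (i + 1) 0 then acc ++ [-1]
        else acc ++ [1]) []
  if S_prime.length = 0 then 0
  else
    (PySem.List.pyRange 1 (S_prime.length : Int) 1).foldl
      (fun T k =>
        if PySem.List.pyGetD S_prime k 0 ≠ PySem.List.pyGetD S_prime (k - 1) 0 then T + 1 else T) 1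

-- ===== PORT B =====
-- Source B's inner while loop: advance past the pairs whose direction still equals `up`
def pvSkipRun (up : Bool) : List Int → List Int
  | b :: c :: rest => if (!(decide (b > c))) == up then pvSkipRun up (c :: rest) else b :: c :: rest
  | l => l

lemma pvSkipRun_length_le (up : Bool) : ∀ (L : List Int), (pvSkipRun up L).length ≤ L.length
  | [] => le_refl _
  | [_] => le_refl _
  | b :: c :: rest => by
      rw [pvSkipRun]
      split_ifs
      · exact le_trans (pvSkipRun_length_le up (c :: rest)) (by simp)
      · exact le_refl _

-- Source B's outer while loop: one recursive step per counted run
def pvOuterRuns : List Int → Int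
  | a :: b :: rest => pvOuterRuns (pvSkipRun (!(decide (a > b))) (b :: rest)) + 1
  | _ => 0
termination_by L => L.length
decreasing_by
  exact Nat.lt_succ_of_le (pvSkipRun_length_le _ (b :: rest))

def n_directional_runs_alt (S : List Int) : Int := pvOuterRuns S

-- ===== PRECONDITION & SPEC =====
def Spec_n_directional_runs (S : List Int) (out : Int) : Prop := out = n_directional_runs_alt S
instance (S : List Int) (out : Int) : Decidable (Spec_n_directional_runs S out) := by unfold Spec_n_directional_runs; infer_instance

-- ===== CLAIM (what is proved, stated in full; the proofs are below) =====
def Claim_equal_n_directional_runs : Prop := ∀ (S : List Int), Dom_n_directional_runs S → Spec_n_directional_runs S (n_directional_runs S)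

-- ===== LEMMAS AND PROOFS =====

-- the list of pairwise directions (A's S_prime, computed structurally)
def pvSigns : List Int → List Int
  | a :: b :: rest => (if a > b then (-1 : Int) else 1) :: pvSigns (b :: rest)
  | _ => []

-- number of direction changes relative to a previous direction p
def pvTrans (p : Int) : List Int → Int
  | [] => 0
  | d :: ds => (if d ≠ p then 1 else 0) + pvTrans d ds

-- A's first loop builds exactly pvSigns S
lemma mapRange_signs : ∀ S : List Int,
    (List.range (S.length - 1)).map
      (fun k => if S.getD k 0 > S.getD (k + 1) 0 then (-1 : Int) else 1) = pvSigns S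
  | [] => rfl
  | [_] => rfl
  | a :: b :: rest => by
      have ih := mapRange_signs (b :: rest)
      show (List.range ((b :: rest).length + 1 - 1)).map _ = _
      rw [Nat.add_sub_cancel, List.length_cons, List.range_succ_eq_map, List.map_cons,
        List.map_map, pvSigns]
      refine congrArg₂ List.cons rfl ?_
      rw [← ih]
      apply List.map_congr_left
      intro k hk
      simp [Function.comp]

lemma sPrime_eq (S : List Int) :
    (PySem.List.pyRange 0 ((S.length : Int) - 1) 1).foldl
      (fun acc i =>
        if PySem.List.pyGetD S i 0 > PySem.List.pyGetD S (i + 1) 0 then acc ++ [-1]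
        else acc ++ [1]) [] = pvSigns S := by
  have h : ∀ (l : List Int) (acc : List Int),
      l.foldl (fun acc i =>
        if PySem.List.pyGetD S i 0 > PySem.List.pyGetD S (i + 1) 0 then acc ++ [-1]
        else acc ++ [1]) acc
      = acc ++ l.map (fun i => if PySem.List.pyGetD S i 0 > PySem.List.pyGetD S (i + 1) 0 then (-1 : Int) else 1) := by
    intro l
    induction l with
    | nil => simp
    | cons x xs ih => intro acc; simp only [List.foldl_cons, List.map_cons]; split_ifs <;> simp [ih]
  rw [h, List.nil_append, PySem.List.pyRange_one, List.map_map]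
  have hn : (((S.length : Int) - 1) - 0).toNat = S.length - 1 := by omega
  rw [hn, ← mapRange_signs S]
  apply List.map_congr_left
  intro k _
  have h1 : (0 : Int) + (k : Int) = ((k : Nat) : Int) := by omega
  have h2 : ((k : Nat) : Int) + 1 = (((k + 1 : Nat)) : Int) := by omega
  show (if PySem.List.pyGetD S (0 + (k : Int)) 0 > PySem.List.pyGetD S (0 + (k : Int) + 1) 0
      then (-1 : Int) else 1) = _
  rw [h1, h2, PySem.List.pyGetD_natCast, PySem.List.pyGetD_natCast]

-- A's second loop counts transitions
lemma foldTrans : ∀ (L : List Int) (p T : Int),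
    (List.range L.length).foldl
      (fun T k => if (p :: L).getD (k + 1) 0 ≠ (p :: L).getD k 0 then T + 1 else T) T
    = T + pvTrans p L
  | [], p, T => by simp [pvTrans]
  | d :: ds, p, T => by
      rw [List.length_cons, List.range_succ_eq_map, List.foldl_cons, List.foldl_map]
      have step : ∀ (T' : Int),
          (List.range ds.length).foldl
            (fun T' k => if (p :: d :: ds).getD (k + 1 + 1) 0 ≠ (p :: d :: ds).getD (k + 1) 0 then T' + 1 else T') T'
          = T' + pvTrans d ds := by
        intro T'
        rw [← foldTrans ds d T']
        apply PySem.List.foldl_congr_mem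
        intro acc x _
        simp
      simp only [List.getD_cons_succ, List.getD_cons_zero] at *
      rw [step]
      simp only [pvTrans]
      split_ifs <;> omega

lemma second_loop_eq (p : Int) (ds : List Int) :
    (PySem.List.pyRange 1 (((p :: ds).length : Int)) 1).foldl
      (fun T k =>
        if PySem.List.pyGetD (p :: ds) k 0 ≠ PySem.List.pyGetD (p :: ds) (k - 1) 0 then T + 1 else T) 1
    = 1 + pvTrans p ds := by
  rw [PySem.List.pyRange_one, List.foldl_map]
  have hn : ((((p :: ds).length : Int)) - 1).toNat = ds.length := by
    simp only [List.length_cons]; omega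
  rw [hn, ← foldTrans ds p 1]
  apply PySem.List.foldl_congr_mem
  intro acc k _
  have h1 : (1 : Int) + (k : Int) = (((k + 1 : Nat)) : Int) := by omega
  have h2 : (((k + 1 : Nat)) : Int) - 1 = ((k : Nat) : Int) := by omega
  rw [h1, h2, PySem.List.pyGetD_natCast, PySem.List.pyGetD_natCast]

-- B's segment scan counts exactly the transitions of the sign list relative to `up`
lemma pvOuter_skip : ∀ (L : List Int) (up : Bool),
    pvOuterRuns (pvSkipRun up L) = pvTrans (if up then 1 else -1) (pvSigns L)
  | [], up => by simp [pvSkipRun, pvOuterRuns, pvSigns, pvTrans]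
  | [b], up => by simp [pvSkipRun, pvOuterRuns, pvSigns, pvTrans]
  | b :: c :: rest, up => by
      rw [pvSkipRun]
      by_cases h : (!(decide (b > c))) = up
      · rw [if_pos (by simp [h]), pvOuter_skip (c :: rest) up]
        have hd : (if b > c then (-1 : Int) else 1) = (if up then 1 else -1) := by
          cases up <;> by_cases hbc : b > c <;> simp_all
        simp only [pvSigns, pvTrans, hd]
        simp
      · rw [if_neg (by simpa using h), pvOuterRuns,
          pvOuter_skip (c :: rest) (!(decide (b > c)))]
        have hne : (if b > c then (-1 : Int) else 1) ≠ (if up then 1 else -1) := by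
          cases up <;> by_cases hbc : b > c <;> simp_all
        have hd : (if (!(decide (b > c))) then (1 : Int) else -1) = (if b > c then (-1 : Int) else 1) := by
          by_cases hbc : b > c <;> simp [hbc]
        simp only [pvSigns, pvTrans, hd, if_pos hne]
        omega
termination_by L _ => L.length

-- ===== VERDICT (by name: the statement is the Claim_ definition above) =====
theorem n_directional_runs_spec : Claim_equal_n_directional_runs := by
  intro S _
  unfold Spec_n_directional_runs n_directional_runs n_directional_runs_alt
  simp only [sPrime_eq S]
  match S with
  | [] => simp [pvSigns, pvOuterRuns]
  | [a] => simp [pvSigns, pvOuterRuns]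
  | a :: b :: rest =>
      have hs : pvSigns (a :: b :: rest) = (if a > b then (-1 : Int) else 1) :: pvSigns (b :: rest) := rfl
      rw [hs, if_neg (by simp), second_loop_eq, pvOuterRuns, pvOuter_skip]
      have hd : (if (!(decide (a > b))) then (1 : Int) else -1) = (if a > b then (-1 : Int) else 1) := by
        by_cases hab : a > b <;> simp [hab]
      rw [hd]; omega
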